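-- pv_equiv track=rewrite | github.com/Chia-vie/CodeHernstein | Challenges/konverter.py | konverter
-- ===== SOURCE A (Python) =====
-- def konverter(wert, user_einheit):
--     user_einheit = user_einheit.upper() # In upper case String umwandeln, für Vergleichbarkeit
--     einheiten = ['FLUP','BLUP','SNUP']
--     if user_einheit == 'FLUP':
--         var1 = wert + 1 # Umrechnen in BLUP
--         var2 = wert - 1 # Umrechnen in SNUP
--
--     elif user_einheit == 'BLUP':
--         var1 = wert - 1 # Umrechnen in FLUP
--         var2 = wert - 2 # Umrechnen in SNUP
--
--     elif user_einheit == 'SNUP':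
--         var1 = wert + 1 # Umrechnen in FLUP
--         var2 = wert + 2 # Umrechnen in BLUP
--
--     else: # falls Einheit falsch => wird beendet ohne unteren Teil auszuführen
--         return 'Tut mir leid, ich kenne diese Einheit nicht.'
--
--     einheiten.remove(user_einheit) # Nur die nicht eingegebenen Einheiten ins Ergebnis übernehmen.
--     ergebnis = dict((e,v) for e,v in zip(einheiten, (var1,var2))) # Einheiten und zugehörige Ergebnisse in Dictionary speichern
--     return ergebnis
-- ===== SOURCE B (Python) =====
-- def konverter(wert, user_einheit):
--     # Table-driven: one offset table instead of three enumerated branches.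
--     user_einheit = user_einheit.upper()
--     offs = {'FLUP': 0, 'BLUP': 1, 'SNUP': -1}
--     if user_einheit not in offs:
--         return 'Tut mir leid, ich kenne diese Einheit nicht.'
--     ou = offs[user_einheit]
--     return {e: wert + o - ou for e, o in offs.items() if e != user_einheit}
-- ===== Notes on version B (the rewrite author's own statement) =====
-- stated objective: simpler
-- what changed: Replaces the three enumerated unit branches by a single offset table and one table-driven comprehension over the fixed unit order.
import Mathlib
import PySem

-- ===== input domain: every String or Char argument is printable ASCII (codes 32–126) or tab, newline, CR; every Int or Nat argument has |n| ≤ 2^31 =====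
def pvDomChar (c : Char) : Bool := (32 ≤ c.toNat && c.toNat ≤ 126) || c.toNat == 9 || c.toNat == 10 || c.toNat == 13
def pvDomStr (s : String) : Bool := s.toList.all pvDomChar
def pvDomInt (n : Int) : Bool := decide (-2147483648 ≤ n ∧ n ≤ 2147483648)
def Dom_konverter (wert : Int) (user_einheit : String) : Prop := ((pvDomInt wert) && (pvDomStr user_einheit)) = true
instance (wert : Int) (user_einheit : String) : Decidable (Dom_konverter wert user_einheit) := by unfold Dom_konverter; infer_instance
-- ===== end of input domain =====

-- B replaces A's three enumerated branches with one offset table and a table-driven loop (simpler decomposition).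
-- Equivalence is about the dictionary path; on unknown units A returns a string (not a dict), excluded by Pre_.

-- ===== PORT A =====
-- helper: the common tail after the if/elif chain (remove the input unit, zip with (var1, var2), build the dict)
def konverterTail (einheiten : List String) (u : String) (var1 var2 : Int) : List (String × Int) :=
  let einheiten := (PySem.List.remove? einheiten u).getD einheiten
  (PySem.Dict.ofList (einheiten.zip [var1, var2])).items

def konverter (wert : Int) (user_einheit : String) : List (String × Int) :=
  let user_einheit := PySem.Str.upper user_einheit
  let einheiten : List String := ["FLUP", "BLUP", "SNUP"]
  if user_einheit == "FLUP" then
    konverterTail einheiten user_einheit (wert + 1) (wert - 1)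
  else if user_einheit == "BLUP" then
    konverterTail einheiten user_einheit (wert - 1) (wert - 2)
  else if user_einheit == "SNUP" then
    konverterTail einheiten user_einheit (wert + 1) (wert + 2)
  else []  -- Python returns an error STRING here (not a dict): outside Pre_konverter

-- ===== PORT B =====
def konverter_alt (wert : Int) (user_einheit : String) : List (String × Int) :=
  let u := PySem.Str.upper user_einheit
  let offs : List (String × Int) := [("FLUP", 0), ("BLUP", 1), ("SNUP", -1)]
  if (PySem.Dict.mk offs).contains u then
    let ou := (PySem.Dict.mk offs).getD u 0
    (offs.filter (fun p => p.1 ≠ u)).map (fun p => (p.1, wert + p.2 - ou))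
  else []  -- Python returns the error string here: outside Pre_konverter

-- ===== PRECONDITION & SPEC =====
-- Pre_ excludes unknown units, on which A returns an error STRING instead of a dict (no value of the declared type).
def Pre_konverter (wert : Int) (user_einheit : String) : Prop :=
  PySem.Str.upper user_einheit ∈ ["FLUP", "BLUP", "SNUP"]
instance (wert : Int) (user_einheit : String) : Decidable (Pre_konverter wert user_einheit) := by unfold Pre_konverter; infer_instance
def pvWitness_konverter : Int × String := (3, "flup")

def Spec_konverter (wert : Int) (user_einheit : String) (out : List (String × Int)) : Prop := out = konverter_alt wert user_einheit
instance (wert : Int) (user_einheit : String) (out : List (String × Int)) : Decidable (Spec_konverter wert user_einheit out) := by unfold Spec_konverter; infer_instance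

-- ===== CLAIM (what is proved, stated in full; the proofs are below) =====
def Claim_equal_konverter : Prop := ∀ (wert : Int) (user_einheit : String), Dom_konverter wert user_einheit → Pre_konverter wert user_einheit → Spec_konverter wert user_einheit (konverter wert user_einheit)

-- ===== LEMMAS AND PROOFS =====

-- ===== VERDICT (by name: the statement is the Claim_ definition above) =====
theorem konverter_spec : Claim_equal_konverter := by
  intro wert s _ hpre
  unfold Spec_konverter
  unfold Pre_konverter at hpre
  simp only [List.mem_cons, List.not_mem_nil, or_false] at hpre
  rcases hpre with h | h | h
  · simp [konverter, konverter_alt, konverterTail, h,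
      (by decide : PySem.List.remove? ["FLUP","BLUP","SNUP"] "FLUP" = some ["BLUP","SNUP"]),
      PySem.Dict.ofList, PySem.Dict.empty, PySem.Dict.update, PySem.Dict.insert,
      PySem.Dict.contains, PySem.Dict.getD, PySem.Dict.get?]
    omega
  · simp [konverter, konverter_alt, konverterTail, h,
      (by decide : PySem.List.remove? ["FLUP","BLUP","SNUP"] "BLUP" = some ["FLUP","SNUP"]),
      PySem.Dict.ofList, PySem.Dict.empty, PySem.Dict.update, PySem.Dict.insert,
      PySem.Dict.contains, PySem.Dict.getD, PySem.Dict.get?]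
    omega
  · simp [konverter, konverter_alt, konverterTail, h,
      (by decide : PySem.List.remove? ["FLUP","BLUP","SNUP"] "SNUP" = some ["FLUP","BLUP"]),
      PySem.Dict.ofList, PySem.Dict.empty, PySem.Dict.update, PySem.Dict.insert,
      PySem.Dict.contains, PySem.Dict.getD, PySem.Dict.get?]
    omega
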